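-- pv_equiv track=rewrite | github.com/Luzifer/CloudKeys | api/SecurePasswordGenerator.py | __has_no_pattern
-- ===== SOURCE A (Python) =====
-- def __has_no_pattern(password):
--   patternstrings = [
--     'abcdefghijklmnopqrstuvwxyz', # Alphabet
--     '01234567890', # Numeric increasing
--     'qwertzuiopasdfghjklyxcvbnm', # German keyboard layout
--     'zyxwvutsrqponmlkjihgfedcba', # Alphabet reversed
--     '09876543210', # Numeric decreasing
--     'mnbvcxylkjhgfdsapoiuztrewq', # German keyboard layout reversed
--     '789_456_123_147_258_369_159_753', # Numpad patterns
--   ]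
--
--   i = 0 # Set a simple counter
--   while i < len(password) - 2:
--     lpwd = password.lower()
--     part = lpwd[i:i+2] # Extract 3 character parts of the password
--     for pstring in patternstrings:
--       if part in pstring:
--         return False
--       if part[::-1] in pstring:
--         return False
--     i = i + 1
--
--   return True
-- ===== SOURCE B (Python) =====
-- # B: precompute one set of all forbidden lowercase character pairs (every
-- # consecutive 2-gram of each pattern string plus its reverse), then scan the
-- # password's adjacent pairs once with O(1) set lookups.
--
-- _PATTERNSTRINGS = [
--     'abcdefghijklmnopqrstuvwxyz',  # Alphabet
--     '01234567890',  # Numeric increasing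
--     'qwertzuiopasdfghjklyxcvbnm',  # German keyboard layout
--     'zyxwvutsrqponmlkjihgfedcba',  # Alphabet reversed
--     '09876543210',  # Numeric decreasing
--     'mnbvcxylkjhgfdsapoiuztrewq',  # German keyboard layout reversed
--     '789_456_123_147_258_369_159_753',  # Numpad patterns
-- ]
--
-- _GRAMS = set()
-- for _p in _PATTERNSTRINGS:
--     for _x, _y in zip(_p, _p[1:]):
--         _GRAMS.add((_x, _y))
--         _GRAMS.add((_y, _x))
--
--
-- def __has_no_pattern(password):
--     lpwd = password.lower()
--     return all(pair not in _GRAMS for pair in zip(lpwd, lpwd[1:]))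
-- ===== Notes on version B (the rewrite author's own statement) =====
-- stated objective: faster
-- what changed: Replaced the per-position inner loop over seven pattern strings with substring scans by one precomputed set of all forbidden adjacent character pairs (each pattern 2-gram and its reverse), then a single pass over the lowercased password's adjacent pairs with O(1) set lookups; the lowercasing is hoisted out of the loop.
-- intended difference: On passwords whose lowercased form has its final adjacent character pair in a pattern (and no earlier adjacent pair in any pattern), A returns True because its loop bound len(password)-2 never inspects the last pair, while B returns False; B's value is intended since the function is meant to reject a sequential pattern anywhere in the password. — e.g. on __has_no_pattern("xab"): A returns true, B returns false
import Mathlib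
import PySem

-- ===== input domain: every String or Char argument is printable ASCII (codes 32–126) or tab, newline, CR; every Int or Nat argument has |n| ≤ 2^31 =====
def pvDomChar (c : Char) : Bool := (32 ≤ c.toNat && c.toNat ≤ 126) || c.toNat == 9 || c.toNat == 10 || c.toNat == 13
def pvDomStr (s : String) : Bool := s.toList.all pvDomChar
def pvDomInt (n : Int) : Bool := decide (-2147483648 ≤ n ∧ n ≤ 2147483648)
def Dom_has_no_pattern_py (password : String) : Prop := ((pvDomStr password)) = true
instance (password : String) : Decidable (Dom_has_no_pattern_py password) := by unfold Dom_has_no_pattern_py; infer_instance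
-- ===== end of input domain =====

-- B replaces A's per-position scan over seven pattern strings by one precomputed
-- set of forbidden character pairs and a single pass over all adjacent pairs; A's
-- loop bound skips the final pair, so B differs (intentionally) exactly there.


-- ===== PORT A =====
def pvPatterns : List (List Char) :=
  [ "abcdefghijklmnopqrstuvwxyz".toList,        -- Alphabet
    "01234567890".toList,                       -- Numeric increasing
    "qwertzuiopasdfghjklyxcvbnm".toList,        -- German keyboard layout
    "zyxwvutsrqponmlkjihgfedcba".toList,        -- Alphabet reversed
    "09876543210".toList,                       -- Numeric decreasing
    "mnbvcxylkjhgfdsapoiuztrewq".toList,        -- German keyboard layout reversed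
    "789_456_123_147_258_369_159_753".toList ]  -- Numpad patterns

-- the inner 'for pstring in patternstrings' loop: true = some 'return False' fired
def pvCheckA (part : List Char) (ps : List (List Char)) : Bool :=
  match ps with
  | [] => false
  | p :: rest =>
    if PySem.Chars.isIn part p then true
    else if PySem.Chars.isIn part.reverse p then true  -- part[::-1] is reverse
    else pvCheckA part rest

-- 'i = 0; while i < len(password) - 2: …'
def pvLoopA (password : String) (i : Nat) : Bool :=
  if h : (i : Int) < PySem.Str.len password - 2 then
    let lpwd := PySem.Chars.lower password.toList
    let part := PySem.Chars.slice lpwd (some (i : Int)) (some ((i : Int) + 2))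
    if pvCheckA part pvPatterns then false
    else pvLoopA password (i + 1)
  else true
termination_by password.length - i
decreasing_by simp [PySem.Str.len] at h; omega

def has_no_pattern_py (password : String) : Bool := pvLoopA password 0

-- ===== PORT B =====
-- the module-level set of forbidden pairs: every adjacent pair of every pattern and its reverse
def pvGramsList : List (Char × Char) :=
  pvPatterns.flatMap (fun p => (p.zip p.tail).flatMap (fun q => [(q.1, q.2), (q.2, q.1)]))

def pvGrams : PySem.Set (Char × Char) := PySem.Set.ofList pvGramsList

def has_no_pattern_py_alt (password : String) : Bool :=
  let lpwd := PySem.Chars.lower password.toList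
  -- all(pair not in _GRAMS for pair in zip(lpwd, lpwd[1:]))
  (lpwd.zip lpwd.tail).all (fun q => !(PySem.Set.contains pvGrams q))

-- ===== PRECONDITION & SPEC =====
-- A never inspects the last adjacent pair (loop bound len-2) and so misses a sequential
-- pattern ending the password; B checks every adjacent pair. D_ = exactly those inputs:
-- the final adjacent pair of the lowercased password (in either order) occurs in one of
-- the seven pattern strings, and no earlier adjacent pair does.
def D_has_no_pattern_py (password : String) : Prop :=
  let l := PySem.Chars.lower password.toList
  let ps := l.zip l.tail
  let bad := fun q : Char × Char => ∃ p ∈ pvPatterns, q ∈ p.zip p.tail ∨ q.swap ∈ p.zip p.tail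
  ps ≠ [] ∧ bad ps.getLast! ∧ ∀ q ∈ ps.dropLast, ¬ bad q
instance (password : String) : Decidable (D_has_no_pattern_py password) := by unfold D_has_no_pattern_py; infer_instance

def Spec_has_no_pattern_py (password : String) (out : Bool) : Prop := ¬ D_has_no_pattern_py password → out = has_no_pattern_py_alt password
instance (password : String) (out : Bool) : Decidable (Spec_has_no_pattern_py password out) := by unfold Spec_has_no_pattern_py; infer_instance

def pvDiffWitness_has_no_pattern_py : String := "xab"
def pvDiffWitnessOut_has_no_pattern_py : Bool × Bool := (true, false)

-- ===== CLAIM (what is proved, stated in full; the proofs are below) =====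
def Claim_unchanged_has_no_pattern_py : Prop := ∀ (password : String), Dom_has_no_pattern_py password → Spec_has_no_pattern_py password (has_no_pattern_py password)
def Claim_changed_has_no_pattern_py : Prop := Dom_has_no_pattern_py (pvDiffWitness_has_no_pattern_py) ∧ D_has_no_pattern_py (pvDiffWitness_has_no_pattern_py) ∧ has_no_pattern_py (pvDiffWitness_has_no_pattern_py) = pvDiffWitnessOut_has_no_pattern_py.1 ∧ has_no_pattern_py_alt (pvDiffWitness_has_no_pattern_py) = pvDiffWitnessOut_has_no_pattern_py.2 ∧ pvDiffWitnessOut_has_no_pattern_py.1 ≠ pvDiffWitnessOut_has_no_pattern_py.2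
def Claim_exact_has_no_pattern_py : Prop := ∀ (password : String), Dom_has_no_pattern_py password → D_has_no_pattern_py password → has_no_pattern_py password ≠ has_no_pattern_py_alt password

-- ===== LEMMAS AND PROOFS =====

-- A's inner loop is an 'any' over the pattern list
theorem pvCheckA_eq_any (part : List Char) (ps : List (List Char)) :
    pvCheckA part ps = ps.any (fun p => PySem.Chars.isIn part p || PySem.Chars.isIn part.reverse p) := by
  induction ps with
  | nil => rfl
  | cons p rest ih =>
    simp only [pvCheckA, List.any_cons, ← ih]
    by_cases h1 : PySem.Chars.isIn part p <;> by_cases h2 : PySem.Chars.isIn part.reverse p <;>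
      simp [h1, h2]

-- a two-element list is an infix exactly when the pair is adjacent
theorem pair_infix_iff (p : List Char) (a b : Char) :
    [a, b] <:+: p ↔ (a, b) ∈ p.zip p.tail := by
  induction p with
  | nil => simp
  | cons x t ih =>
    cases t with
    | nil =>
      constructor
      · intro h
        rcases List.infix_cons_iff.mp h with h | h
        · have := h.length_le; simp at this
        · simp at h
      · intro h; simp at h
    | cons y t' =>
      rw [List.infix_cons_iff, ih]
      simp only [List.tail_cons, List.zip_cons_cons, List.mem_cons, List.cons_prefix_cons,
        Prod.mk.injEq, List.nil_prefix, and_true]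

-- membership in the precomputed pair list
theorem mem_pvGramsList (a b : Char) :
    (a, b) ∈ pvGramsList ↔ ∃ p ∈ pvPatterns, ((a, b) ∈ p.zip p.tail ∨ (b, a) ∈ p.zip p.tail) := by
  simp only [pvGramsList, List.mem_flatMap, List.mem_cons, List.not_mem_nil, or_false]
  constructor
  · rintro ⟨p, hp, ⟨q1, q2⟩, hq, h | h⟩ <;> simp only [Prod.mk.injEq] at h <;>
      obtain ⟨h1, h2⟩ := h <;> subst h1 <;> subst h2
    · exact ⟨p, hp, Or.inl hq⟩
    · exact ⟨p, hp, Or.inr hq⟩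
  · rintro ⟨p, hp, h | h⟩
    · exact ⟨p, hp, (a, b), h, Or.inl rfl⟩
    · exact ⟨p, hp, (b, a), h, Or.inr rfl⟩

-- the pointwise bridge: A's check of password[i:i+2] equals B's set lookup of the i-th pair
theorem pvCheckA_eq_contains (l : List Char) (i : Nat) (h : i + 2 ≤ l.length) :
    pvCheckA (PySem.List.slice l (some (i : Int)) (some ((i : Int) + 2))) pvPatterns
      = PySem.Set.contains pvGrams (l.getD i ' ', l.getD (i + 1) ' ') := by
  have hi : i < l.length := by omega
  have hi1 : i + 1 < l.length := by omega
  have hcast : ((i : Int) + 2) = ((i + 2 : Nat) : Int) := by push_cast; ring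
  have hslice : PySem.List.slice l (some (i : Int)) (some ((i : Int) + 2))
      = [l[i], l[i + 1]] := by
    rw [hcast, PySem.List.slice_natCast]
    have h2 : i + 2 - i = 2 := by omega
    rw [h2, List.drop_eq_getElem_cons hi, List.drop_eq_getElem_cons hi1]
    rfl
  rw [hslice, List.getD_eq_getElem l ' ' hi, List.getD_eq_getElem l ' ' hi1]
  rw [Bool.eq_iff_iff, pvCheckA_eq_any, List.any_eq_true,
    PySem.Set.contains_iff, pvGrams, PySem.Set.mem_ofList, mem_pvGramsList]
  simp only [Bool.or_eq_true, PySem.Chars.isIn_iff_infix,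
    show ∀ a b : Char, ([a, b] : List Char).reverse = [b, a] from fun _ _ => rfl,
    pair_infix_iff]

-- the adjacent-pair list minus its last element, written by index
theorem zip_tail_dropLast_eq (l : List Char) :
    (l.zip l.tail).dropLast
      = (List.range (l.length - 2)).map (fun j => (l.getD j ' ', l.getD (j + 1) ' ')) := by
  apply List.ext_getElem
  · simp [List.length_zip, List.length_tail]; omega
  · intro i h1 h2
    have hlen : i < l.length - 2 := by
      simp [List.length_zip, List.length_tail] at h1; omega
    have hi : i < l.length := by omega
    have hi1 : i + 1 < l.length := by omega
    simp [List.getElem_dropLast, List.getElem_zip, List.getElem_tail,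
      List.getElem?_eq_getElem hi, List.getElem?_eq_getElem hi1]

-- A's while loop, characterised as an 'all' over the remaining positions
theorem pvLoopA_eq_all (password : String) (i : Nat) :
    pvLoopA password i
      = (List.range' i (password.length - 2 - i)).all
          (fun j => !(pvCheckA (PySem.List.slice (PySem.Chars.lower password.toList)
              (some (j : Int)) (some ((j : Int) + 2))) pvPatterns)) := by
  generalize hk : password.length - 2 - i = k
  induction k generalizing i with
  | zero =>
    have hnc : ¬ ((i : Int) < PySem.Str.len password - 2) := by
      simp [PySem.Str.len]; omega
    rw [pvLoopA, dif_neg hnc]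
    simp
  | succ k ih =>
    have hcond : (i : Int) < PySem.Str.len password - 2 := by
      simp [PySem.Str.len]; omega
    rw [pvLoopA, dif_pos hcond, List.range'_succ, List.all_cons, ih (i + 1) (by omega)]
    simp only [PySem.Chars.slice_eq_listSlice]
    rcases Bool.eq_false_or_eq_true (pvCheckA (PySem.List.slice (PySem.Chars.lower password.toList)
        (some (i : Int)) (some ((i : Int) + 2))) pvPatterns) with hc | hc <;> simp [hc]

-- A computes B's predicate over all adjacent pairs EXCEPT the last one
theorem has_no_pattern_py_eq_dropLast (password : String) :
    has_no_pattern_py password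
      = (((PySem.Chars.lower password.toList).zip
          (PySem.Chars.lower password.toList).tail).dropLast).all
          (fun q => !(PySem.Set.contains pvGrams q)) := by
  have hlen : (PySem.Chars.lower password.toList).length = password.length := by
    simp [PySem.Chars.lower]
  unfold has_no_pattern_py
  rw [pvLoopA_eq_all]
  simp only [zip_tail_dropLast_eq, List.all_map, hlen, Nat.sub_zero, List.range_eq_range']
  rw [Bool.eq_iff_iff, List.all_eq_true, List.all_eq_true]
  constructor <;> intro hall j hj <;>
  · have hj' : j < password.length - 2 := by
      have := List.mem_range'_1.mp hj; omega
    have hle : j + 2 ≤ (PySem.Chars.lower password.toList).length := by omega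
    have := hall j hj
    simpa [Function.comp, pvCheckA_eq_contains (PySem.Chars.lower password.toList) j hle]
      using this

-- the change-region predicate names exactly the pairs in B's precomputed set
theorem bad_iff (q : Char × Char) :
    (∃ p ∈ pvPatterns, q ∈ p.zip p.tail ∨ q.swap ∈ p.zip p.tail)
      ↔ PySem.Set.contains pvGrams q = true := by
  obtain ⟨a, b⟩ := q
  rw [PySem.Set.contains_iff, pvGrams, PySem.Set.mem_ofList, mem_pvGramsList]
  simp only [Prod.swap_prod_mk]

-- getLast! agrees with getLastD on a nonempty list
theorem getLast_bang_eq_getLastD (ps : List (Char × Char)) (hne : ps ≠ []) :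
    ps.getLast! = ps.getLastD (' ', ' ') := by
  cases ps with
  | nil => exact absurd rfl hne
  | cons a t =>
    rw [List.getLastD_eq_getLast?, List.getLast?_eq_some_getLast (List.cons_ne_nil a t)]
    simp [List.getLast!]

-- D_ re-stated through B's set
theorem D_iff (password : String) :
    D_has_no_pattern_py password ↔
      (let ps := (PySem.Chars.lower password.toList).zip (PySem.Chars.lower password.toList).tail
       ps ≠ [] ∧ PySem.Set.contains pvGrams (ps.getLastD (' ', ' ')) = true ∧
         ps.dropLast.all (fun q => !(PySem.Set.contains pvGrams q)) = true) := by
  unfold D_has_no_pattern_py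
  simp only [bad_iff, List.all_eq_true, Bool.not_eq_true', Bool.not_eq_true]
  constructor
  · rintro ⟨hne, h2, h3⟩
    exact ⟨hne, by rwa [← getLast_bang_eq_getLastD _ hne], h3⟩
  · rintro ⟨hne, h2, h3⟩
    exact ⟨hne, by rwa [getLast_bang_eq_getLastD _ hne], h3⟩

-- all f over a nonempty list = all f over dropLast && f of the last element
theorem all_getLastD {A : Type} (ps : List A) (f : A -> Bool) (d : A) (hne : ps ≠ []) :
    ps.all f = (ps.dropLast.all f && f (ps.getLastD d)) := by
  conv_lhs => rw [← List.dropLast_concat_getLast hne]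
  rw [List.all_append, List.getLastD_eq_getLast?, List.getLast?_eq_some_getLast hne]
  simp

-- B splits into A's value and the check of the final pair
theorem alt_split (password : String)
    (hne : (PySem.Chars.lower password.toList).zip (PySem.Chars.lower password.toList).tail ≠ []) :
    has_no_pattern_py_alt password
      = (has_no_pattern_py password &&
         !(PySem.Set.contains pvGrams
           (((PySem.Chars.lower password.toList).zip
             (PySem.Chars.lower password.toList).tail).getLastD (' ', ' ')))) := by
  simp only [has_no_pattern_py_alt]
  rw [all_getLastD _ _ (' ', ' ') hne, has_no_pattern_py_eq_dropLast]

-- ===== VERDICT (by name: the statements are the Claim_ definitions above) =====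
theorem has_no_pattern_py_spec : Claim_unchanged_has_no_pattern_py := by
  intro password _ hnD
  by_cases hne : (PySem.Chars.lower password.toList).zip (PySem.Chars.lower password.toList).tail = []
  · rw [has_no_pattern_py_eq_dropLast]
    unfold has_no_pattern_py_alt
    simp [hne]
  · rw [alt_split password hne]
    rw [D_iff] at hnD
    simp only [ne_eq, hne, not_false_iff, true_and, not_and] at hnD
    by_cases hlast : PySem.Set.contains pvGrams
        (((PySem.Chars.lower password.toList).zip
          (PySem.Chars.lower password.toList).tail).getLastD (' ', ' ')) = true
    · have hdrop := hnD hlast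
      simp only [Bool.not_eq_true] at hdrop
      rw [has_no_pattern_py_eq_dropLast, hdrop]
      simp
    · simp only [Bool.not_eq_true] at hlast
      rw [hlast]
      simp

set_option maxRecDepth 100000 in
theorem has_no_pattern_py_changed : Claim_changed_has_no_pattern_py := by
  unfold Claim_changed_has_no_pattern_py
  refine ⟨by decide, by decide, ?_, by decide, by decide⟩
  rw [show pvDiffWitness_has_no_pattern_py = "xab" from rfl, has_no_pattern_py_eq_dropLast]
  decide

theorem has_no_pattern_py_tight : Claim_exact_has_no_pattern_py := by
  intro password _ hD
  rw [D_iff] at hD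
  obtain ⟨hne, hlast, hdrop⟩ := hD
  rw [alt_split password hne, has_no_pattern_py_eq_dropLast, hdrop, hlast]
  simp
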